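-- pv_equiv track=rewrite | github.com/JPCervantes/junior-python-developer-coding-task-master | TSVformatter.py | order_list_by_len
-- ===== SOURCE A (Python) =====
-- def order_list_by_len(arrayList):
--
--     max_len = len(arrayList[0])
--     total_len = len(arrayList)
--     result = []
--
--     for index in range(0, total_len):
--         if len(arrayList[index]) > max_len:
--             result.insert(0, arrayList[index])
--             max_len = len(arrayList[index])
--         else:
--             result.append(arrayList[index])
--     return result
-- ===== SOURCE B (Python) =====
-- def order_list_by_len(arrayList):
--     # Stage 1: prefix-maximum table; maxes[i] = max of len(arrayList[0]) and
--     # the lengths of arrayList[:i].  An item belongs to the front part exactly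
--     # when it is a strict new prefix maximum.
--     maxes = [len(arrayList[0])]
--     for x in arrayList:
--         maxes.append(max(maxes[-1], len(x)))
--     # Stage 2: classify by comparing each item with the prefix maximum of its predecessors.
--     front = [x for x, p in zip(arrayList, maxes) if len(x) > p]
--     back = [x for x, p in zip(arrayList, maxes) if len(x) <= p]
--     # Stage 3: newest maxima first, then the rest in order.
--     return front[::-1] + back
-- ===== Notes on version B (the rewrite author's own statement) =====
-- stated objective: alternative
-- what changed: B replaces A's single stateful pass with insert(0) by a staged pipeline: build a prefix-maximum table, classify each item by comparing its length with the prefix maximum of its predecessors (strict new maxima form the front), and concatenate reversed front with back; no mutable result list or front insertion.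
import Mathlib
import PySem

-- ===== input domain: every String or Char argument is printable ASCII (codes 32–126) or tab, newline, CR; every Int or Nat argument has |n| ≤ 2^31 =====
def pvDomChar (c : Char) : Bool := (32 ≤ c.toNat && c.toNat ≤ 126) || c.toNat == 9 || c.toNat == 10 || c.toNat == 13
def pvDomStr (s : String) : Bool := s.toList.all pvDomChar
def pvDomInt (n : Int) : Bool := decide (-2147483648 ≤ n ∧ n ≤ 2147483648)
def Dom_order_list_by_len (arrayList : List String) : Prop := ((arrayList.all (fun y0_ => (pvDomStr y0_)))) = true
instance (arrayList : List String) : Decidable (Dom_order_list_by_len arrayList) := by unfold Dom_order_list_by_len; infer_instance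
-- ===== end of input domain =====

-- ===== PORT A =====
-- B replaces A's stateful pass (insert(0)/append on one list) by a staged pipeline:
-- prefix-maximum table, classification against it, one concatenation; objective: alternative.
-- A's loop: state (max_len, result); insert(0,x) prepends, append adds at the end.
def pvLoopA : List String → Int → List String → List String
  | [], _, result => result
  | x :: rest, maxLen, result =>
    if PySem.Str.len x > maxLen then pvLoopA rest (PySem.Str.len x) (x :: result)
    else pvLoopA rest maxLen (result ++ [x])

def order_list_by_len (arrayList : List String) : List String :=
  match PySem.List.pyGet? arrayList 0 with
  | none => []   -- Python raises IndexError here (empty list); excluded by Pre_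
  | some h => pvLoopA arrayList (PySem.Str.len h) []

-- ===== PORT B =====
-- Stage 1: prefix-maximum table (Python loop appending max(maxes[-1], len x) = scanl);
-- Stage 2: two filters over zip; Stage 3: front[::-1] + back (slice [::-1] = reverse, exact).
def order_list_by_len_alt (arrayList : List String) : List String :=
  match PySem.List.pyGet? arrayList 0 with
  | none => []   -- Python raises IndexError here (empty list); excluded by Pre_
  | some h =>
    let maxes := arrayList.scanl (fun acc x => max acc (PySem.Str.len x)) (PySem.Str.len h)
    let pairs := arrayList.zip maxes
    let front := (pairs.filter (fun p => PySem.Str.len p.1 > p.2)).map Prod.fst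
    let back := (pairs.filter (fun p => PySem.Str.len p.1 ≤ p.2)).map Prod.fst
    front.reverse ++ back

-- ===== PRECONDITION & SPEC =====
-- A raises IndexError on the empty list (arrayList[0]); both programs return on every other input.
def Pre_order_list_by_len (arrayList : List String) : Prop := arrayList ≠ []
instance (arrayList : List String) : Decidable (Pre_order_list_by_len arrayList) := by
  unfold Pre_order_list_by_len; infer_instance
def pvWitness_order_list_by_len : List String := ["a", "bcd", "ef"]
def Spec_order_list_by_len (arrayList : List String) (out : List String) : Prop := out = order_list_by_len_alt arrayList
instance (arrayList : List String) (out : List String) : Decidable (Spec_order_list_by_len arrayList out) := by unfold Spec_order_list_by_len; infer_instance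

-- ===== CLAIM =====
def Claim_equal_order_list_by_len : Prop := ∀ (arrayList : List String), Dom_order_list_by_len arrayList → Pre_order_list_by_len arrayList → Spec_order_list_by_len arrayList (order_list_by_len arrayList)

-- ===== LEMMAS AND PROOFS =====
-- Abstract front (strict new prefix maxima, in order) and back parts of the result.
def pvF : List String → Int → List String
  | [], _ => []
  | x :: rest, m => if PySem.Str.len x > m then x :: pvF rest (PySem.Str.len x) else pvF rest m

def pvB : List String → Int → List String
  | [], _ => []
  | x :: rest, m => if PySem.Str.len x > m then pvB rest (PySem.Str.len x) else x :: pvB rest m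

theorem pvLoopA_eq (rest : List String) : ∀ (m : Int) (result : List String),
    pvLoopA rest m result = (pvF rest m).reverse ++ result ++ pvB rest m := by
  induction rest with
  | nil => intro m result; simp [pvLoopA, pvF, pvB]
  | cons x rest ih =>
    intro m result
    simp only [pvLoopA, pvF, pvB]
    split
    · rw [ih]; simp
    · rw [ih]; simp

theorem pvAlt_eq (l : List String) : ∀ (m : Int),
    ((l.zip (l.scanl (fun acc x => max acc (PySem.Str.len x)) m)).filter
        (fun p => PySem.Str.len p.1 > p.2)).map Prod.fst = pvF l m ∧
    ((l.zip (l.scanl (fun acc x => max acc (PySem.Str.len x)) m)).filter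
        (fun p => PySem.Str.len p.1 ≤ p.2)).map Prod.fst = pvB l m := by
  induction l with
  | nil => intro m; simp [pvF, pvB]
  | cons x rest ih =>
    intro m
    by_cases h : PySem.Str.len x > m
    · have h' : m < (x.length : Int) := h
      have hnle : ¬ ((x.length : Int) ≤ m) := by omega
      have hm : max m ((x.length : Int)) = (x.length : Int) := by omega
      simp [List.scanl_cons, pvF, pvB, PySem.Str.len, hm, h', hnle]
      exact ⟨by simpa [PySem.Str.len] using (ih (PySem.Str.len x)).1,
             by simpa [PySem.Str.len] using (ih (PySem.Str.len x)).2⟩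
    · have h' : ¬ m < (x.length : Int) := h
      have hle : (x.length : Int) ≤ m := by omega
      have hm : max m ((x.length : Int)) = m := by omega
      simp [List.scanl_cons, pvF, pvB, PySem.Str.len, h', hle]
      exact ⟨by simpa [PySem.Str.len] using (ih m).1,
             by simpa [PySem.Str.len] using (ih m).2⟩

-- ===== VERDICT =====
theorem order_list_by_len_spec : Claim_equal_order_list_by_len := by
  intro arrayList _ hpre
  unfold Spec_order_list_by_len order_list_by_len order_list_by_len_alt
  cases arrayList with
  | nil => exact absurd rfl hpre
  | cons h t =>
    rw [show PySem.List.pyGet? (h :: t) (0 : Int) = some h from by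
      simp [PySem.List.pyGet?, PySem.List.pyIdx?]]
    dsimp only
    rw [pvLoopA_eq, (pvAlt_eq (h :: t) (PySem.Str.len h)).1,
      (pvAlt_eq (h :: t) (PySem.Str.len h)).2]
    simp
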